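-- pv_equiv track=rewrite | github.com/ashique6465/DSA | Accenture/MaxExponents.py | MaxExponents
-- ===== SOURCE A (Python) =====
-- def MaxExponents(a,b):
--     def exponent_of_2(n):
--         count = 0
--         while n % 2 == 0 and n != 0:
--             n //=2
--             count +=1
--         return count
--     max_number = a
--     max_exponent = exponent_of_2(a)
--     for i in range(a+1,b+1):
--         current_exponent = exponent_of_2(i)
--         if current_exponent > max_exponent:
--             max_exponent = current_exponent
--             max_number = i
--         elif current_exponent == max_exponent and i < max_number:
--             max_number = i
--
--     return max_number
-- ===== SOURCE B (Python) =====
-- def MaxExponents(a, b):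
--     if b <= a:
--         return a
--     k = max(abs(a), abs(b)).bit_length()
--     while k >= 1:
--         p = 1 << k
--         m = -((-a) // p) * p        # smallest multiple of p that is >= a
--         if m == 0:
--             m = p                   # 0 has exponent 0, skip to next nonzero multiple
--         if m <= b:
--             return m
--         k -= 1
--     return a
-- ===== Notes on version B (the rewrite author's own statement) =====
-- stated objective: faster
-- what changed: Instead of scanning every integer in [a,b] and computing its power-of-2 exponent, B searches powers 2^k from the highest possible bit length downward and returns the smallest nonzero multiple of the largest power that has one in the range (the answer is exactly that multiple).
import Mathlib
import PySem

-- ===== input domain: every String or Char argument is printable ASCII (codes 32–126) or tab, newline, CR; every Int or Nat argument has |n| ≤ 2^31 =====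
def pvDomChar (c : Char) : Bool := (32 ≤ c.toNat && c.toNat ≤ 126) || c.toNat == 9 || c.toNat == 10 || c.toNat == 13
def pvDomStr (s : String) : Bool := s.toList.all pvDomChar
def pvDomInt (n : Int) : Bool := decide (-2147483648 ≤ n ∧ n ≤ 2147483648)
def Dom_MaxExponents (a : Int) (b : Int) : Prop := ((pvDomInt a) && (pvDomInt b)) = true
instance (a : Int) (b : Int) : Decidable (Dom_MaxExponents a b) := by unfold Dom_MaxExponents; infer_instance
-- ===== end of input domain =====

-- B replaces A's scan of every integer in [a,b] by a descending search over powers of two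
-- (return the smallest nonzero multiple of the largest power having one in the range): asymptotically faster.


-- ===== PORT A =====
-- A's inner 'while n % 2 == 0 and n != 0: n //= 2; count += 1'
def pyExp2Go (n : Int) (count : Int) : Int :=
  if h : PySem.Int.mod n 2 = 0 ∧ n ≠ 0 then pyExp2Go (PySem.Int.floordiv n 2) (count + 1)
  else count
termination_by n.natAbs
decreasing_by
  rw [PySem.Int.floordiv_eq_ediv_of_pos (by norm_num)]
  obtain ⟨m, rfl⟩ := (PySem.Int.mod_eq_zero_iff_dvd n 2).mp h.1
  rw [Int.mul_ediv_cancel_left _ (by norm_num), Int.natAbs_mul,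
    show (2:Int).natAbs = 2 from rfl]
  have : m.natAbs ≠ 0 := by simpa using fun hm => h.2 (by simp [hm])
  omega

def pyExp2 (n : Int) : Int := pyExp2Go n 0

def MaxExponents (a : Int) (b : Int) : Int :=
  ((PySem.List.pyRange (a + 1) (b + 1) 1).foldl (fun s i =>
      let cur := pyExp2 i
      if cur > s.2 then (i, cur)
      else if cur = s.2 ∧ i < s.1 then (i, s.2) else s)
    (a, pyExp2 a)).1

-- ===== PORT B =====
-- B's 'while k >= 1' loop, recursing on k
def altGo (a : Int) (b : Int) : Nat → Int
  | 0 => a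
  | Nat.succ k' =>
    let p : Int := (1 : Int) <<< (k' + 1)
    let m := -(PySem.Int.floordiv (-a) p) * p
    let m := if m = 0 then p else m
    if m ≤ b then m else altGo a b k'

def MaxExponents_alt (a : Int) (b : Int) : Int :=
  if b ≤ a then a
  else altGo a b (PySem.Int.bitLength (max |a| |b|))

-- ===== PRECONDITION & SPEC =====
def Spec_MaxExponents (a : Int) (b : Int) (out : Int) : Prop := out = MaxExponents_alt a b
instance (a : Int) (b : Int) (out : Int) : Decidable (Spec_MaxExponents a b out) := by unfold Spec_MaxExponents; infer_instance

-- ===== CLAIM (what is proved, stated in full; the proofs are below) =====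
def Claim_equal_MaxExponents : Prop := ∀ (a : Int) (b : Int), Dom_MaxExponents a b → Spec_MaxExponents a b (MaxExponents a b)

-- ===== LEMMAS AND PROOFS =====

-- power-of-2 exponent (2-adic valuation of |n|; 0 at 0, matching A's exponent_of_2)
def e2 (n : Int) : Nat := padicValNat 2 n.natAbs

lemma e2_zero : e2 0 = 0 := by simp [e2]

lemma e2_of_odd {n : Int} (h : ¬ (2:Int) ∣ n) : e2 n = 0 := by
  unfold e2
  exact padicValNat.eq_zero_of_not_dvd (fun hd => h (Int.natAbs_dvd_natAbs.mp (by simpa using hd)))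

lemma e2_two_mul {m : Int} (hm : m ≠ 0) : e2 (2 * m) = e2 m + 1 := by
  unfold e2
  rw [Int.natAbs_mul]
  have hm' : m.natAbs ≠ 0 := by simpa using fun h => hm (by simp [h])
  rw [show (2:Int).natAbs = 2 from rfl, padicValNat.mul (by norm_num) hm',
    padicValNat.self (by norm_num)]
  omega

lemma e2_pow_dvd (n : Int) : (2:Int) ^ e2 n ∣ n := by
  rcases eq_or_ne n 0 with rfl | hn
  · simp
  · have h : (2:Nat) ^ e2 n ∣ n.natAbs := pow_padicValNat_dvd
    refine Int.natAbs_dvd_natAbs.mp ?_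
    simpa [Int.natAbs_pow] using h

lemma le_e2_of_pow_dvd {n : Int} (hn : n ≠ 0) {k : Nat} (h : (2:Int) ^ k ∣ n) : k ≤ e2 n := by
  have hna : n.natAbs ≠ 0 := fun h0 => hn (Int.natAbs_eq_zero.mp h0)
  have h' : (2:Nat) ^ k ∣ n.natAbs := by
    have := Int.natAbs_dvd_natAbs.mpr h
    simpa [Int.natAbs_pow] using this
  exact (padicValNat_dvd_iff_le hna).mp h'

lemma pyExp2Go_eq (n count : Int) : pyExp2Go n count = count + (e2 n : Int) := by
  fun_induction pyExp2Go n count with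
  | case1 n count h ih =>
    rw [ih]
    obtain ⟨m, rfl⟩ := (PySem.Int.mod_eq_zero_iff_dvd n 2).mp h.1
    have hm : m ≠ 0 := fun hm => h.2 (by simp [hm])
    rw [PySem.Int.floordiv_eq_ediv_of_pos (by norm_num),
      Int.mul_ediv_cancel_left _ (by norm_num), e2_two_mul hm]
    push_cast; ring
  | case2 n count h =>
    rcases eq_or_ne n 0 with rfl | hn
    · simp [e2_zero]
    · have : ¬ (2:Int) ∣ n := by
        intro hd
        exact h ⟨(PySem.Int.mod_eq_zero_iff_dvd n 2).mpr hd, hn⟩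
      simp [e2_of_odd this]

lemma pyExp2_eq (n : Int) : pyExp2 n = (e2 n : Int) := by
  simp [pyExp2, pyExp2Go_eq]

-- the characterisation both programs satisfy: n is in [a,b], of maximal exponent, and least among those
def Good (a b n : Int) : Prop :=
  a ≤ n ∧ n ≤ b ∧ (∀ i, a ≤ i → i ≤ b → e2 i ≤ e2 n) ∧
    (∀ i, a ≤ i → i ≤ b → e2 i = e2 n → n ≤ i)

lemma Good_unique {a b n n' : Int} (h : Good a b n) (h' : Good a b n') : n = n' := by
  obtain ⟨h1, h2, h3, h4⟩ := h
  obtain ⟨h1', h2', h3', h4'⟩ := h'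
  have e1 : e2 n ≤ e2 n' := h3' n h1 h2
  have e2' : e2 n' ≤ e2 n := h3 n' h1' h2'
  have := h4 n' h1' h2' (by omega)
  have := h4' n h1 h2 (by omega)
  omega

-- A's fold over range(a+1, a+d+1) lands in state (n, e2 n) with Good a (a+d) n
lemma A_loop (a : Int) (d : Nat) :
    ∃ n : Int, ((PySem.List.pyRange (a + 1) (a + d + 1) 1).foldl (fun s i =>
        let cur := pyExp2 i
        if cur > s.2 then (i, cur)
        else if cur = s.2 ∧ i < s.1 then (i, s.2) else s)
      (a, pyExp2 a)) = (n, (e2 n : Int)) ∧ Good a (a + d) n := by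
  induction d with
  | zero =>
    refine ⟨a, ?_, ?_⟩
    · rw [show a + ((0:Nat):Int) + 1 = a + 1 by omega,
        PySem.List.pyRange_one_eq_nil (by omega)]
      simp [pyExp2_eq]
    · refine ⟨le_rfl, by omega, ?_, ?_⟩
      · intro i h1 h2
        have hia : i = a := by omega
        rw [hia]
      · intro i h1 _ _
        exact h1
  | succ d ih =>
    obtain ⟨n, hfold, hn1, hn2, hn3, hn4⟩ := ih
    set x : Int := a + d + 1 with hx
    have hxe : a + ((d+1:Nat):Int) = x := by omega
    rw [show a + ((d+1:Nat):Int) + 1 = x + 1 by omega,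
      PySem.List.pyRange_one_succ_right (by omega), List.foldl_append, hfold]
    simp only [List.foldl_cons, List.foldl_nil]
    by_cases hgt : (pyExp2 x) > ((e2 n : Int))
    · rw [if_pos hgt]
      have hgt' : e2 n < e2 x := by rw [pyExp2_eq] at hgt; exact_mod_cast hgt
      rw [hxe]
      refine ⟨x, by rw [pyExp2_eq], by omega, le_rfl, ?_, ?_⟩
      · intro i h1 h2
        rcases eq_or_lt_of_le h2 with rfl | hlt
        · exact le_rfl
        · have := hn3 i h1 (by omega)
          omega
      · intro i h1 h2 he
        by_contra hc
        have := hn3 i h1 (by omega)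
        omega
    · rw [if_neg hgt]
      have hle : e2 x ≤ e2 n := by
        rw [pyExp2_eq] at hgt; exact_mod_cast not_lt.mp hgt
      rw [if_neg (by rw [pyExp2_eq]; rintro ⟨-, hlt⟩; omega)]
      rw [hxe]
      refine ⟨n, rfl, by omega, by omega, ?_, ?_⟩
      · intro i h1 h2
        rcases eq_or_lt_of_le h2 with rfl | hlt
        · exact hle
        · exact hn3 i h1 (by omega)
      · intro i h1 h2 he
        rcases eq_or_lt_of_le h2 with rfl | hlt
        · omega
        · exact hn4 i h1 (by omega) he

lemma A_good (a b : Int) (hab : a ≤ b) :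
    ∃ n, MaxExponents a b = n ∧ Good a b n := by
  obtain ⟨n, hfold, hgood⟩ := A_loop a (b - a).toNat
  rw [show a + (((b - a).toNat : Nat) : Int) = b by omega] at hfold hgood
  exact ⟨n, by rw [MaxExponents, hfold], hgood⟩

lemma shl_one (k : Nat) : (1:Int) <<< k = 2 ^ k := by
  rw [Int.shiftLeft_eq]; ring

-- the smallest nonzero multiple of 2^k that is ≥ a, as B computes it
lemma chooseMul (a : Int) (k : Nat) :
    (2:Int)^k ∣ (if -(PySem.Int.floordiv (-a) ((2:Int)^k)) * ((2:Int)^k) = 0 then (2:Int)^k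
        else -(PySem.Int.floordiv (-a) ((2:Int)^k)) * ((2:Int)^k)) ∧
    (if -(PySem.Int.floordiv (-a) ((2:Int)^k)) * ((2:Int)^k) = 0 then (2:Int)^k
        else -(PySem.Int.floordiv (-a) ((2:Int)^k)) * ((2:Int)^k)) ≠ 0 ∧
    a ≤ (if -(PySem.Int.floordiv (-a) ((2:Int)^k)) * ((2:Int)^k) = 0 then (2:Int)^k
        else -(PySem.Int.floordiv (-a) ((2:Int)^k)) * ((2:Int)^k)) ∧
    ∀ j, (2:Int)^k ∣ j → j ≠ 0 → a ≤ j →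
      (if -(PySem.Int.floordiv (-a) ((2:Int)^k)) * ((2:Int)^k) = 0 then (2:Int)^k
        else -(PySem.Int.floordiv (-a) ((2:Int)^k)) * ((2:Int)^k)) ≤ j := by
  set p : Int := (2:Int)^k with hpdef
  have hp : 0 < p := by positivity
  set q : Int := -(PySem.Int.floordiv (-a) p) with hq
  have hqc : (q - 1) * p < a ∧ a ≤ q * p :=
    (PySem.Int.neg_floordiv_neg_eq_iff_of_pos hp).mp rfl
  by_cases h0 : q * p = 0
  · have hq0 : q = 0 := by
      rcases mul_eq_zero.mp h0 with h | h
      · exact h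
      · omega
    rw [if_pos h0]
    refine ⟨dvd_rfl, by omega, by nlinarith [hqc.2, hq0], ?_⟩
    intro j hdvd hj0 haj
    obtain ⟨c, rfl⟩ := hdvd
    have hc0 : c ≠ 0 := by rintro rfl; simp at hj0
    rcases lt_or_gt_of_ne hc0 with hc | hc
    · exfalso
      have : p * c ≤ p * (-1) := by
        apply mul_le_mul_of_nonneg_left (by omega) (le_of_lt hp)
      have h2 : (q - 1) * p < a := hqc.1
      rw [hq0] at h2
      nlinarith
    · have h3 : p * 1 ≤ p * c := mul_le_mul_of_nonneg_left (by omega) (le_of_lt hp)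
      simpa using h3
  · rw [if_neg h0]
    refine ⟨dvd_mul_left p q, h0, hqc.2, ?_⟩
    intro j hdvd hj0 haj
    obtain ⟨c, rfl⟩ := hdvd
    have hlt : q - 1 < c := by
      have h1 : (q - 1) * p < p * c := lt_of_lt_of_le hqc.1 haj
      nlinarith
    have h3 : p * q ≤ p * c := mul_le_mul_of_nonneg_left (by omega) (le_of_lt hp)
    nlinarith

lemma B_loop (a b : Int) (hab : a < b) : ∀ (k : Nat),
    (∀ i, a ≤ i → i ≤ b → e2 i ≤ k) → Good a b (altGo a b k) := by
  intro k
  induction k with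
  | zero =>
    intro H
    simp only [altGo]
    refine ⟨le_rfl, by omega, ?_, fun i h1 _ _ => h1⟩
    intro i h1 h2
    have := H i h1 h2
    omega
  | succ k' ih =>
    intro H
    simp only [altGo, shl_one]
    obtain ⟨hdvd, hne, hge, hmin⟩ := chooseMul a (k' + 1)
    set m : Int := (if -(PySem.Int.floordiv (-a) ((2:Int)^(k'+1))) * ((2:Int)^(k'+1)) = 0
        then (2:Int)^(k'+1)
        else -(PySem.Int.floordiv (-a) ((2:Int)^(k'+1))) * ((2:Int)^(k'+1))) with hm
    by_cases hb : m ≤ b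
    · rw [if_pos hb]
      have hgeE : k' + 1 ≤ e2 m := le_e2_of_pow_dvd hne hdvd
      have hleE : e2 m ≤ k' + 1 := H m hge hb
      refine ⟨hge, hb, ?_, ?_⟩
      · intro i h1 h2
        have := H i h1 h2
        omega
      · intro i h1 h2 he
        have hi0 : i ≠ 0 := by
          rintro rfl
          rw [e2_zero] at he
          omega
        refine hmin i (dvd_trans (pow_dvd_pow 2 (by omega)) (e2_pow_dvd i)) hi0 h1
    · rw [if_neg hb]
      apply ih
      intro i h1 h2
      by_contra hc
      have hi0 : i ≠ 0 := by
        rintro rfl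
        rw [e2_zero] at hc
        omega
      have hdi : (2:Int)^(k'+1) ∣ i :=
        dvd_trans (pow_dvd_pow 2 (by omega)) (e2_pow_dvd i)
      exact hb (le_trans (hmin i hdi hi0 h1) h2)

lemma B_good (a b : Int) (hab : a < b) : Good a b (MaxExponents_alt a b) := by
  rw [MaxExponents_alt, if_neg (by omega)]
  apply B_loop a b hab
  intro i h1 h2
  rcases eq_or_ne i 0 with rfl | hi0
  · rw [e2_zero]; exact Nat.zero_le _
  · have hd : (2:Nat) ^ e2 i ∣ i.natAbs := by
      have := Int.natAbs_dvd_natAbs.mpr (e2_pow_dvd i)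
      simpa [Int.natAbs_pow] using this
    have hle1 : (2:Nat) ^ e2 i ≤ i.natAbs :=
      Nat.le_of_dvd (by omega) hd
    have habs : max |a| |b| = ((max a.natAbs b.natAbs : Nat) : Int) := by
      rw [Int.abs_eq_natAbs, Int.abs_eq_natAbs, Nat.cast_max]
    have hle2 : i.natAbs ≤ max a.natAbs b.natAbs := by
      rcases le_total 0 i with hi | hi
      · exact le_trans (by omega) (le_max_right _ _)
      · exact le_trans (by omega) (le_max_left _ _)
    have hlt : (max a.natAbs b.natAbs : Nat) < 2 ^ PySem.Int.bitLength (max |a| |b|) := by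
      have hNN := PySem.Int.lt_two_pow_bitLength ((max a.natAbs b.natAbs : Nat) : Int)
      rw [Int.natAbs_natCast] at hNN
      rw [habs]
      exact hNN
    have : (2:Nat) ^ e2 i < 2 ^ PySem.Int.bitLength (max |a| |b|) := by omega
    exact Nat.le_of_lt ((Nat.pow_lt_pow_iff_right (by norm_num)).mp this)

-- ===== VERDICT (by name: the statement is the Claim_ definition above) =====
theorem MaxExponents_spec : Claim_equal_MaxExponents := by
  intro a b _
  unfold Spec_MaxExponents
  by_cases hba : b ≤ a
  · rw [MaxExponents, PySem.List.pyRange_one_eq_nil (by omega), List.foldl_nil,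
      MaxExponents_alt, if_pos hba]
  · have hab : a < b := by omega
    obtain ⟨n, hA, hGoodA⟩ := A_good a b (le_of_lt hab)
    rw [hA]
    exact Good_unique hGoodA (B_good a b hab)
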